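-- pv_equiv track=rewrite | github.com/asmerlinsky/PyLeech | spikeUtils.py | getSpikeIndexes
-- ===== SOURCE A (Python) =====
-- def getSpikeIndexes(indexes, spike_indexes):
--     spikes = []
--     for i in range(len(indexes)):
--         for j in range(len(spike_indexes)):
--             if -200<=(indexes[i]-spike_indexes[j]) and (indexes[i]-spike_indexes[j])<800:
--                 spikes.append(i)
--                 break
--     return spikes
-- ===== SOURCE B (Python) =====
-- def getSpikeIndexes(indexes, spike_indexes):
--     # Sort the spikes once, then answer each index with one binary search:
--     # i is kept iff some spike s satisfies x - 799 <= s <= x + 200 (x = indexes[i]).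
--     sp = sorted(spike_indexes)
--     n = len(sp)
--     out = []
--     for i, x in enumerate(indexes):
--         lo, hi = 0, n
--         v = x - 799
--         while lo < hi:
--             mid = (lo + hi) // 2
--             if sp[mid] < v:
--                 lo = mid + 1
--             else:
--                 hi = mid
--         if lo < n and sp[lo] <= x + 200:
--             out.append(i)
--     return out
-- ===== Notes on version B (the rewrite author's own statement) =====
-- stated objective: faster
-- what changed: Replaces the inner linear scan over spike_indexes by sorting the spikes once and doing a lower-bound binary search per index (membership in the window [x-799, x+200]).
import Mathlib
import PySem

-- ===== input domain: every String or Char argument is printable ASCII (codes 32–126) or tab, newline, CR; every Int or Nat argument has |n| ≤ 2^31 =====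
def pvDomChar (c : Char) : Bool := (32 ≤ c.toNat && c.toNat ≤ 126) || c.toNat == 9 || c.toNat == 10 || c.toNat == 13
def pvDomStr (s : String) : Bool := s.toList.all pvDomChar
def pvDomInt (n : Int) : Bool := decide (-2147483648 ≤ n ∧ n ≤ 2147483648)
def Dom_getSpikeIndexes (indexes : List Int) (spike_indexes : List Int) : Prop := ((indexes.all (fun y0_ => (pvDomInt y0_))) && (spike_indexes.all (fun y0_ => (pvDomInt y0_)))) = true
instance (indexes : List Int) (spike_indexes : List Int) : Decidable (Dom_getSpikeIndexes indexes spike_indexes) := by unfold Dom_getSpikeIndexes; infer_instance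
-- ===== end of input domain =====

-- B replaces A's inner linear scan by sorting the spikes once plus a lower-bound
-- binary search per index (objective: faster, O(n*m) -> O((n+m) log m)).

-- ===== PORT A =====
-- inner 'for j … if cond: append(i); break' loop: returns whether some spike matches x
def pvInnerA (x : Int) : List Int → Bool
  | [] => false
  | s :: rest => if -200 ≤ x - s ∧ x - s < 800 then true else pvInnerA x rest

-- outer 'for i in range(len(indexes))' loop, i the running position
def pvOuterA (sp : List Int) : Int → List Int → List Int
  | _, [] => []
  | i, x :: rest =>
      if pvInnerA x sp then i :: pvOuterA sp (i + 1) rest else pvOuterA sp (i + 1) rest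

def getSpikeIndexes (indexes : List Int) (spike_indexes : List Int) : List Int :=
  pvOuterA spike_indexes 0 indexes

-- ===== PORT B =====
-- 'while lo < hi' lower-bound binary search from Source B
def pvLB (sp : List Int) (v : Int) (lo hi : Nat) : Nat :=
  if _h : lo < hi then
    let mid := (lo + hi) / 2
    if sp.getD mid 0 < v then pvLB sp v (mid + 1) hi else pvLB sp v lo mid
  else lo
termination_by hi - lo
decreasing_by all_goals omega

def getSpikeIndexes_alt (indexes : List Int) (spike_indexes : List Int) : List Int :=
  let sp := PySem.List.sorted spike_indexes (fun x => x) false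
  let n := sp.length
  (PySem.List.enumerate indexes 0).foldl
    (fun acc p =>
      let lo := pvLB sp (p.2 - 799) 0 n
      if lo < n ∧ sp.getD lo 0 ≤ p.2 + 200 then acc ++ [p.1] else acc) []

-- ===== PRECONDITION & SPEC =====
def Spec_getSpikeIndexes (indexes : List Int) (spike_indexes : List Int) (out : List Int) : Prop := out = getSpikeIndexes_alt indexes spike_indexes
instance (indexes : List Int) (spike_indexes : List Int) (out : List Int) : Decidable (Spec_getSpikeIndexes indexes spike_indexes out) := by unfold Spec_getSpikeIndexes; infer_instance

-- ===== CLAIM (what is proved, stated in full; the proofs are below) =====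
def Claim_equal_getSpikeIndexes : Prop := ∀ (indexes : List Int) (spike_indexes : List Int), Dom_getSpikeIndexes indexes spike_indexes → Spec_getSpikeIndexes indexes spike_indexes (getSpikeIndexes indexes spike_indexes)

-- ===== LEMMAS AND PROOFS =====

theorem pvInnerA_iff (x : Int) (sp : List Int) :
    pvInnerA x sp = true ↔ ∃ s ∈ sp, -200 ≤ x - s ∧ x - s < 800 := by
  induction sp with
  | nil => simp [pvInnerA]
  | cons s rest ih =>
    simp only [pvInnerA]
    split_ifs with h
    · refine ⟨fun _ => ⟨s, by simp, h⟩, fun _ => rfl⟩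
    · simp only [List.mem_cons]
      constructor
      · intro hr
        obtain ⟨t, ht, hc⟩ := ih.mp hr
        exact ⟨t, Or.inr ht, hc⟩
      · rintro ⟨t, (rfl | ht), hc⟩
        · exact absurd hc h
        · exact ih.mpr ⟨t, ht, hc⟩

theorem pvLB_spec (sp : List Int) (v : Int)
    (hmono : ∀ p q : Nat, p ≤ q → q < sp.length → sp.getD p 0 ≤ sp.getD q 0) :
    ∀ (lo hi : Nat), hi ≤ sp.length → lo ≤ hi →
    (∀ k < lo, sp.getD k 0 < v) →
    (∀ k, hi ≤ k → k < sp.length → v ≤ sp.getD k 0) →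
    lo ≤ pvLB sp v lo hi ∧ pvLB sp v lo hi ≤ hi ∧
      (∀ k < pvLB sp v lo hi, sp.getD k 0 < v) ∧
      (∀ k, pvLB sp v lo hi ≤ k → k < sp.length → v ≤ sp.getD k 0) := by
  intro lo hi
  induction lo, hi using pvLB.induct sp v with
  | case1 lo hi h mid hlt ih =>
    intro hhi hlohi hbelow habove
    rw [pvLB]
    simp only [h, dite_true]
    have hmid : lo ≤ mid ∧ mid < hi := by constructor <;> omega
    simp only [show mid = (lo + hi) / 2 from rfl] at *
    rw [if_pos hlt]
    have := ih (by omega) (by omega)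
      (by intro k hk
          rcases Nat.lt_or_ge k ((lo + hi) / 2) with h' | h'
          · exact lt_of_le_of_lt (hmono k ((lo + hi) / 2) (by omega) (by omega)) hlt
          · have : k = (lo + hi) / 2 := by omega
            simpa [this] using hlt)
      habove
    exact ⟨by omega, by omega, this.2.2.1, this.2.2.2⟩
  | case2 lo hi h mid hge ih =>
    intro hhi hlohi hbelow habove
    rw [pvLB]
    simp only [h, dite_true]
    simp only [show mid = (lo + hi) / 2 from rfl] at *
    rw [if_neg hge]
    have := ih (by omega) (by omega) hbelow
      (by intro k hk hklen
          exact le_trans (not_lt.mp hge) (hmono ((lo + hi) / 2) k hk hklen))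
    exact ⟨this.1, by omega, this.2.2.1, this.2.2.2⟩
  | case3 lo hi h =>
    intro hhi hlohi hbelow habove
    have hEq : lo = hi := by omega
    subst hEq
    rw [pvLB]
    simp only [h, dite_false]
    exact ⟨le_refl _, le_refl _, hbelow, habove⟩

-- lower-bound test on a sorted list decides window membership
theorem pvLB_window (sp : List Int) (v w : Int)
    (hmono : ∀ p q : Nat, p ≤ q → q < sp.length → sp.getD p 0 ≤ sp.getD q 0) :
    (pvLB sp v 0 sp.length < sp.length ∧ sp.getD (pvLB sp v 0 sp.length) 0 ≤ w)
      ↔ ∃ s ∈ sp, v ≤ s ∧ s ≤ w := by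
  obtain ⟨-, hle, hbelow, habove⟩ :=
    pvLB_spec sp v hmono 0 sp.length (le_refl _) (Nat.zero_le _)
      (by intro k hk; omega) (by intro k hk hk'; omega)
  set r := pvLB sp v 0 sp.length with hr
  constructor
  · rintro ⟨hrlt, hw⟩
    refine ⟨sp.getD r 0, ?_, habove r (le_refl _) hrlt, hw⟩
    rw [List.getD_eq_getElem _ _ hrlt]
    exact List.getElem_mem _
  · rintro ⟨s, hs, hvs, hsw⟩
    obtain ⟨k, hk, rfl⟩ := List.getElem_of_mem hs
    have hks : sp.getD k 0 = sp[k] := List.getD_eq_getElem _ _ hk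
    have hrk : r ≤ k := by
      by_contra hc
      have := hbelow k (by omega)
      rw [hks] at this; omega
    refine ⟨by omega, ?_⟩
    calc sp.getD r 0 ≤ sp.getD k 0 := hmono r k hrk hk
      _ ≤ w := by rw [hks]; exact hsw

theorem foldl_appif_eq (c : Int → Prop) [DecidablePred c] :
    ∀ (l : List (Int × Int)) (acc : List Int),
      l.foldl (fun acc p => if c p.2 then acc ++ [p.1] else acc) acc
        = acc ++ (l.filter (fun q => decide (c q.2))).map (·.1) := by
  intro l
  induction l with
  | nil => simp
  | cons p t ih =>
    intro acc
    simp only [List.foldl_cons, List.filter_cons]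
    by_cases h : c p.2
    · simp [h, ih]
    · simp [h, ih]

theorem pvOuterA_eq (sp : List Int) (p : Int → Bool)
    (hp : ∀ x, pvInnerA x sp = p x) :
    ∀ (xs : List Int) (i : Int),
      pvOuterA sp i xs = ((PySem.List.enumerate xs i).filter (fun q => p q.2)).map (·.1) := by
  intro xs
  induction xs with
  | nil => intro i; simp [pvOuterA, PySem.List.enumerate_nil]
  | cons x rest ih =>
    intro i
    simp only [pvOuterA, PySem.List.enumerate_cons, List.filter_cons, hp x]
    by_cases h : p x
    · simp [h, ih (i + 1)]
    · simp [h, ih (i + 1)]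

-- ===== VERDICT (by name: the statement is the Claim_ definition above) =====
theorem getSpikeIndexes_spec : Claim_equal_getSpikeIndexes := by
  intro indexes spike_indexes _
  unfold Spec_getSpikeIndexes getSpikeIndexes getSpikeIndexes_alt
  set sp := PySem.List.sorted spike_indexes (fun x => x) false with hsp
  have hmono : ∀ p q : Nat, p ≤ q → q < sp.length → sp.getD p 0 ≤ sp.getD q 0 := by
    intro p q hpq hq
    rw [List.getD_eq_getElem _ _ (by omega), List.getD_eq_getElem _ _ hq]
    exact PySem.List.sorted_id_getElem_mono spike_indexes hpq hq
  change pvOuterA spike_indexes 0 indexes =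
    List.foldl (fun acc p =>
        if pvLB sp (p.2 - 799) 0 sp.length < sp.length ∧
            sp.getD (pvLB sp (p.2 - 799) 0 sp.length) 0 ≤ p.2 + 200
          then acc ++ [p.1] else acc)
      [] (PySem.List.enumerate indexes 0)
  rw [foldl_appif_eq (fun x => pvLB sp (x - 799) 0 sp.length < sp.length ∧
        sp.getD (pvLB sp (x - 799) 0 sp.length) 0 ≤ x + 200)]
  simp only [List.nil_append]
  have hkey : ∀ x : Int, pvInnerA x spike_indexes =
      (fun x : Int => decide (pvLB sp (x - 799) 0 sp.length < sp.length ∧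
        sp.getD (pvLB sp (x - 799) 0 sp.length) 0 ≤ x + 200)) x := by
    intro x
    rw [Bool.eq_iff_iff, pvInnerA_iff, decide_eq_true_iff, pvLB_window sp _ _ hmono]
    constructor
    · rintro ⟨s, hs, h1, h2⟩
      exact ⟨s, (PySem.List.mem_sorted _ _ _ _).mpr hs, by omega, by omega⟩
    · rintro ⟨s, hs, h1, h2⟩
      exact ⟨s, (PySem.List.mem_sorted _ _ _ _).mp hs, by omega, by omega⟩
  exact pvOuterA_eq spike_indexes _ hkey indexes 0
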